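-- pv_equiv track=rewrite | github.com/djcomidi/projecteuler | problem183.py | is_terminating
-- ===== SOURCE A (Python) =====
-- def is_terminating(n, d):
--     checks = set()
--     q, r = 0, 0
--     while True:
--         q, r = divmod(n, d)
--         if (q, r) in checks:
--             break
--         checks.add((q, r))
--         n = r * 10
--     return (q, r) == (0, 0)
-- ===== SOURCE B (Python) =====
-- def is_terminating(n, d):
--     # Euclid's algorithm on absolute values
--     a, g = abs(n), abs(d)
--     while a:
--         a, g = g % a, a
--     # reduced denominator
--     m = abs(d) // g
--     # strip factors of 2 and 5
--     while m % 2 == 0: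
--         m //= 2
--     while m % 5 == 0:
--         m //= 5
--     return m == 1
-- ===== Notes on version B (the rewrite author's own statement) =====
-- stated objective: faster
-- what changed: A simulates the long division digit by digit, detecting a repeated (quotient, remainder) state; B reduces the fraction with Euclid's gcd, strips the factors 2 and 5 from the reduced denominator and checks whether 1 remains.
import Mathlib
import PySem

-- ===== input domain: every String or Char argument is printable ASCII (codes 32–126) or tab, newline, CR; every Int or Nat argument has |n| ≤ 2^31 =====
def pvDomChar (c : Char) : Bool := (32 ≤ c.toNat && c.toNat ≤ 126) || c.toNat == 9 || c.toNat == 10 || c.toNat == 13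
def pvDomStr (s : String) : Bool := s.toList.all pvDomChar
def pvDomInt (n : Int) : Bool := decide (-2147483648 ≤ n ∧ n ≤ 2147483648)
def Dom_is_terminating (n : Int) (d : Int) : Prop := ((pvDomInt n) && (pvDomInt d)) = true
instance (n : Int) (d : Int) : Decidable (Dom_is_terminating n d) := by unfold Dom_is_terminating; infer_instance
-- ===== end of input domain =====

-- B replaces A's O(d) long-division cycle detection by Euclid's gcd plus stripping the
-- factors 2 and 5 from the reduced denominator (O(log d)); equivalence of return values is proved for d ≠ 0.

-- ===== PORT A =====
-- the 'while True' loop; fuel is a totality device only (d.natAbs + 3 steps always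
-- suffice before the loop breaks, as the proofs below establish)
def isTermLoop (d : Int) (fuel : Nat) (checks : PySem.Set (Int × Int)) (n : Int) : Bool :=
  match fuel with
  | 0 => false
  | fuel + 1 =>
    match PySem.Int.divmod? n d with
    | none => false                                -- d = 0: Python raises ZeroDivisionError (outside Pre_)
    | some (q, r) =>
      if PySem.Set.contains checks (q, r) then decide ((q, r) = ((0 : Int), (0 : Int)))
      else isTermLoop d fuel (PySem.Set.add checks (q, r)) (r * 10)

def is_terminating (n : Int) (d : Int) : Bool :=
  isTermLoop d (d.natAbs + 3) PySem.Set.empty n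

-- ===== PORT B =====
-- 'while a: a, g = g % a, a' — a stays nonnegative (it starts as abs(n) and g % a ≥ 0
-- for a > 0), so '0 < a' is Python's 'a != 0' on every reachable state (totality guard)
def euclidLoop (a g : Int) : Int :=
  if h : 0 < a then euclidLoop (PySem.Int.mod g a) a else g
termination_by a.toNat
decreasing_by
  have h1 := PySem.Int.mod_nonneg g h
  have h2 := PySem.Int.mod_lt g h
  omega

-- 'while m % p == 0: m //= p' — the '1 < p ∧ 0 < m' conjuncts are a totality guard only:
-- p is the literal 2 or 5 and m ≥ 1 on every reachable state
def stripLoop (p m : Int) : Int :=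
  if h : 1 < p ∧ 0 < m ∧ PySem.Int.mod m p = 0 then stripLoop p (PySem.Int.floordiv m p) else m
termination_by m.toNat
decreasing_by
  obtain ⟨hp, hm, hmod⟩ := h
  rw [PySem.Int.floordiv_eq_ediv_of_pos (by omega)]
  have h1 : m / p < m := by rw [Int.ediv_lt_iff_lt_mul (by omega)]; nlinarith
  have h2 : 0 ≤ m / p := Int.ediv_nonneg (by omega) (by omega)
  omega

def is_terminating_alt (n : Int) (d : Int) : Bool :=
  let g := euclidLoop |n| |d|
  let m := PySem.Int.floordiv |d| g
  let m2 := stripLoop 2 m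
  let m5 := stripLoop 5 m2
  decide (m5 = 1)

-- ===== PRECONDITION & SPEC =====
-- Pre_ excludes d = 0, where Python A raises ZeroDivisionError
def Pre_is_terminating (n : Int) (d : Int) : Prop := d ≠ 0
instance (n : Int) (d : Int) : Decidable (Pre_is_terminating n d) := by unfold Pre_is_terminating; infer_instance
def pvWitness_is_terminating : Int × Int := (3, 8)

def Spec_is_terminating (n : Int) (d : Int) (out : Bool) : Prop := out = is_terminating_alt n d
instance (n : Int) (d : Int) (out : Bool) : Decidable (Spec_is_terminating n d out) := by unfold Spec_is_terminating; infer_instance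

-- ===== CLAIM (what is proved, stated in full; the proofs are below) =====
def Claim_equal_is_terminating : Prop := ∀ (n : Int) (d : Int), Dom_is_terminating n d → Pre_is_terminating n d → Spec_is_terminating n d (is_terminating n d)

-- ===== LEMMAS AND PROOFS =====

-- Python mod is a complete residue system: equal remainders ↔ congruent
lemma pmod_sub_dvd (a d : Int) : d ∣ (a - PySem.Int.mod a d) := by
  have h := PySem.Int.floordiv_mul_add_mod a d
  exact ⟨PySem.Int.floordiv a d, by linarith⟩

lemma pmod_eq_pmod_iff (d : Int) (hd : d ≠ 0) (a b : Int) :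
    PySem.Int.mod a d = PySem.Int.mod b d ↔ d ∣ (a - b) := by
  constructor
  · intro h
    have ha := pmod_sub_dvd a d
    have hb := pmod_sub_dvd b d
    have : a - b = (a - PySem.Int.mod a d) - (b - PySem.Int.mod b d) := by rw [h]; ring
    rw [this]; exact dvd_sub ha hb
  · intro hab
    have ha := pmod_sub_dvd a d
    have hb := pmod_sub_dvd b d
    have hdvd : d ∣ (PySem.Int.mod a d - PySem.Int.mod b d) := by
      have : PySem.Int.mod a d - PySem.Int.mod b d
          = (a - b) - ((a - PySem.Int.mod a d) - (b - PySem.Int.mod b d)) := by ring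
      rw [this]; exact dvd_sub hab (dvd_sub ha hb)
    have hz : PySem.Int.mod a d - PySem.Int.mod b d = 0 := by
      refine Int.eq_zero_of_abs_lt_dvd ((abs_dvd d _).mpr hdvd) ?_
      rcases lt_or_gt_of_ne hd with hneg | hpos
      · have b1 := PySem.Int.mod_neg_bounds a hneg
        have b2 := PySem.Int.mod_neg_bounds b hneg
        have e0 := abs_nonneg (PySem.Int.mod a d - PySem.Int.mod b d)
        have f0 := abs_nonneg d
        rcases abs_choice (PySem.Int.mod a d - PySem.Int.mod b d) with e1 | e1 <;>
          rcases abs_choice d with f1 | f1 <;> omega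
      · have b1 := PySem.Int.mod_nonneg a hpos
        have b2 := PySem.Int.mod_nonneg b hpos
        have c1 := PySem.Int.mod_lt a hpos
        have c2 := PySem.Int.mod_lt b hpos
        have e0 := abs_nonneg (PySem.Int.mod a d - PySem.Int.mod b d)
        have f0 := abs_nonneg d
        rcases abs_choice (PySem.Int.mod a d - PySem.Int.mod b d) with e1 | e1 <;>
          rcases abs_choice d with f1 | f1 <;> omega
    omega

-- shifting the loop state: the remainder sequence of n' = (n % d) * 10 is that of n shifted by one
lemma pmod_shift (d : Int) (hd : d ≠ 0) (n : Int) (j : Nat) :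
    PySem.Int.mod (10 ^ j * (PySem.Int.mod n d * 10)) d = PySem.Int.mod (10 ^ (j + 1) * n) d := by
  rw [pmod_eq_pmod_iff d hd]
  have h := PySem.Int.floordiv_mul_add_mod n d
  exact ⟨-(PySem.Int.floordiv n d) * 10 ^ (j + 1), by linear_combination ((10:Int) ^ (j + 1)) * h⟩


lemma divmod?_eq (a d : Int) (hd : d ≠ 0) :
    PySem.Int.divmod? a d = some (PySem.Int.floordiv a d, PySem.Int.mod a d) := by
  simp [PySem.Int.divmod?, PySem.Int.floordiv, PySem.Int.mod, hd]

lemma set_contains_iff {s : PySem.Set (Int × Int)} {x : Int × Int} :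
    PySem.Set.contains s x = true ↔ x ∈ s := by
  simp [PySem.Set.contains]

lemma pmod_zero_left (d : Int) (hd : d ≠ 0) : PySem.Int.mod 0 d = 0 :=
  (PySem.Int.mod_eq_zero_iff_dvd 0 d).mpr (dvd_zero d)

lemma pdiv_zero_left (d : Int) (hd : d ≠ 0) : PySem.Int.floordiv 0 d = 0 := by
  have h := PySem.Int.floordiv_mul_add_mod 0 d
  rw [pmod_zero_left d hd] at h
  have : PySem.Int.floordiv 0 d * d = 0 := by omega
  rcases mul_eq_zero.mp this with h' | h'
  · exact h'
  · exact absurd h' hd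

lemma loop_false (d : Int) (hd : d ≠ 0) :
    ∀ (fuel : Nat) (checks : PySem.Set (Int × Int)) (n : Int),
      (∀ k : Nat, ¬ d ∣ 10 ^ k * n) → isTermLoop d fuel checks n = false := by
  intro fuel
  induction fuel with
  | zero => intro checks n _; rfl
  | succ f ih =>
    intro checks n h
    rw [isTermLoop, divmod?_eq n d hd]
    dsimp only
    have hr : PySem.Int.mod n d ≠ 0 := by
      intro h0
      exact h 0 (by simpa using (PySem.Int.mod_eq_zero_iff_dvd n d).mp h0)
    by_cases hmem : PySem.Set.contains checks (PySem.Int.floordiv n d, PySem.Int.mod n d) = true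
    · rw [if_pos hmem]; simp [Prod.ext_iff, hr]
    · rw [if_neg hmem]
      apply ih
      intro k hk
      have : PySem.Int.mod (10 ^ k * (PySem.Int.mod n d * 10)) d = 0 :=
        (PySem.Int.mod_eq_zero_iff_dvd _ d).mpr hk
      rw [pmod_shift d hd n k] at this
      exact h (k + 1) ((PySem.Int.mod_eq_zero_iff_dvd _ d).mp this)

lemma loop_true (d : Int) (hd : d ≠ 0) :
    ∀ (k : Nat) (fuel : Nat) (checks : PySem.Set (Int × Int)) (n : Int),
      k + 3 ≤ fuel →
      d ∣ 10 ^ k * n →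
      (∀ j, j < k → ¬ d ∣ 10 ^ j * n) →
      (∀ p ∈ checks, ∀ j, j ≤ k → p.2 ≠ PySem.Int.mod (10 ^ j * n) d) →
      isTermLoop d fuel checks n = true := by
  intro k
  induction k with
  | zero =>
    intro fuel checks n hfuel hdvd _ hchecks
    obtain ⟨f, rfl⟩ : ∃ f, fuel = f + 3 := ⟨fuel - 3, by omega⟩
    have hr : PySem.Int.mod n d = 0 := (PySem.Int.mod_eq_zero_iff_dvd n d).mpr (by simpa using hdvd)
    rw [isTermLoop, divmod?_eq n d hd]
    dsimp only
    have hnm : ¬ PySem.Set.contains checks (PySem.Int.floordiv n d, PySem.Int.mod n d) = true := by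
      intro hmem
      exact hchecks _ (set_contains_iff.mp hmem) 0 (le_refl 0) (by simpa using hr)
    rw [if_neg hnm, hr]
    rw [show (0 : Int) * 10 = 0 by ring]
    rw [isTermLoop, divmod?_eq 0 d hd, pmod_zero_left d hd, pdiv_zero_left d hd]
    dsimp only
    by_cases h2 : PySem.Set.contains (PySem.Set.add checks (PySem.Int.floordiv n d, 0)) ((0 : Int), (0 : Int)) = true
    · rw [if_pos h2]; simp
    · rw [if_neg h2]
      rw [show (0 : Int) * 10 = 0 by ring]
      rw [isTermLoop, divmod?_eq 0 d hd, pmod_zero_left d hd, pdiv_zero_left d hd]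
      dsimp only
      have h3 : PySem.Set.contains
          (PySem.Set.add (PySem.Set.add checks (PySem.Int.floordiv n d, 0)) ((0 : Int), (0 : Int)))
          ((0 : Int), (0 : Int)) = true := by
        rw [set_contains_iff]
        exact (PySem.Set.mem_add _ _ _).mpr (Or.inr rfl)
      rw [if_pos h3]; simp
  | succ k ih =>
    intro fuel checks n hfuel hdvd hmin hchecks
    obtain ⟨f, rfl⟩ : ∃ f, fuel = f + 1 := ⟨fuel - 1, by omega⟩
    have hr : PySem.Int.mod n d ≠ 0 := by
      intro h0
      exact hmin 0 (by omega) (by simpa using (PySem.Int.mod_eq_zero_iff_dvd n d).mp h0)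
    rw [isTermLoop, divmod?_eq n d hd]
    dsimp only
    have hnm : ¬ PySem.Set.contains checks (PySem.Int.floordiv n d, PySem.Int.mod n d) = true := by
      intro hmem
      exact hchecks _ (set_contains_iff.mp hmem) 0 (by omega) (by simpa using rfl)
    rw [if_neg hnm]
    apply ih f _ _ (by omega)
    · have : PySem.Int.mod (10 ^ (k + 1) * n) d = 0 := (PySem.Int.mod_eq_zero_iff_dvd _ d).mpr hdvd
      rw [← pmod_shift d hd n k] at this
      exact (PySem.Int.mod_eq_zero_iff_dvd _ d).mp this
    · intro j hj hcon
      have : PySem.Int.mod (10 ^ j * (PySem.Int.mod n d * 10)) d = 0 :=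
        (PySem.Int.mod_eq_zero_iff_dvd _ d).mpr hcon
      rw [pmod_shift d hd n j] at this
      exact hmin (j + 1) (by omega) ((PySem.Int.mod_eq_zero_iff_dvd _ d).mp this)
    · intro p hp j hj
      rw [pmod_shift d hd n j]
      rcases (PySem.Set.mem_add _ _ _).mp hp with hold | hnew
      · exact hchecks p hold (j + 1) (by omega)
      · rw [hnew]
        intro heq
        -- p = (q, n % d); n % d reappearing among the later remainders would put a zero
        -- remainder strictly before index k+1, contradicting minimality
        have hcong : d ∣ (10 ^ (j + 1) * n - n) := by
          have := (pmod_eq_pmod_iff d hd (10 ^ (j + 1) * n) n).mp heq.symm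
          exact this
        obtain ⟨t, rfl⟩ : ∃ t, k = j + t := ⟨k - j, by omega⟩
        have h1 : d ∣ 10 ^ t * (10 ^ (j + 1) * n - n) := Dvd.dvd.mul_left hcong _
        have h2 : 10 ^ t * (10 ^ (j + 1) * n - n) = 10 ^ (j + t + 1) * n - 10 ^ t * n := by
          rw [pow_add, pow_add]; ring
        rw [h2] at h1
        have h1' : d ∣ 10 ^ t * n - 10 ^ (j + t + 1) * n := by
          have heqn : 10 ^ t * n - 10 ^ (j + t + 1) * n = -(10 ^ (j + t + 1) * n - 10 ^ t * n) := by
            ring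
          rw [heqn]
          exact dvd_neg.mpr h1
        have h3 : d ∣ 10 ^ t * n := by
          have := dvd_add h1' hdvd
          -- hdvd : d ∣ 10 ^ (j + t + 1) * n  (k + 1 = j + t + 1)
          simpa using this
        exact hmin t (by omega) h3

-- B-side: the Euclid loop is Nat.gcd
lemma euclidLoop_eq_gcd : ∀ (a g : Int), 0 ≤ a → 0 ≤ g →
    euclidLoop a g = (Nat.gcd a.toNat g.toNat : Int) := by
  intro a g
  induction a, g using euclidLoop.induct with
  | case1 a g h ih =>
    intro ha hg
    lift a to Nat using ha with A
    lift g to Nat using hg with G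
    have e1 : PySem.Int.mod (G : Int) (A : Int) = ((G % A : Nat) : Int) := by
      rw [PySem.Int.mod_eq_emod_of_pos h, ← Int.natCast_mod]
    rw [euclidLoop, dif_pos h]
    rw [ih (by rw [e1]; positivity) (by positivity), e1]
    simp only [Int.toNat_natCast]
    norm_cast
    exact (Nat.gcd_rec A G).symm
  | case2 a g h =>
    intro ha hg
    rw [euclidLoop, dif_neg h]
    have ha0 : a.toNat = 0 := by omega
    rw [ha0, Nat.gcd_zero_left, Int.toNat_of_nonneg hg]

-- B-side: the strip loop factors out p exactly
lemma stripLoop_spec (p : Int) (hp : 1 < p) :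
    ∀ (m : Int), 0 < m →
      ∃ a : Nat, m = p ^ a * stripLoop p m ∧ ¬ (p ∣ stripLoop p m) ∧ 0 < stripLoop p m := by
  intro m
  induction m using stripLoop.induct (p := p) with
  | case1 m h ih =>
    intro hm
    obtain ⟨hp', hm', hmod⟩ := h
    have hdvd : p ∣ m := (PySem.Int.mod_eq_zero_iff_dvd m p).mp hmod
    obtain ⟨t, rfl⟩ := hdvd
    have ht : 0 < t := by nlinarith
    have hfd : PySem.Int.floordiv (p * t) p = t := by
      rw [PySem.Int.floordiv_eq_ediv_of_pos (by omega)]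
      exact Int.mul_ediv_cancel_left t (by omega)
    rw [stripLoop, dif_pos ⟨hp', hm', hmod⟩, hfd]
    rw [hfd] at ih
    obtain ⟨a, heq, hnd, hpos⟩ := ih ht
    exact ⟨a + 1, by rw [pow_succ]; nlinarith [heq], hnd, hpos⟩
  | case2 m h =>
    intro hm
    rw [stripLoop, dif_neg h]
    refine ⟨0, by ring, ?_, hm⟩
    intro hdvd
    exact h ⟨hp, hm, (PySem.Int.mod_eq_zero_iff_dvd m p).mpr hdvd⟩

lemma portB_char (n d : Int) (hd : d ≠ 0) :
    (is_terminating_alt n d = true ↔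
      ∃ a b : Nat, d.natAbs / Nat.gcd n.natAbs d.natAbs = 2 ^ a * 5 ^ b) := by
  have hDpos : 0 < d.natAbs := Int.natAbs_pos.mpr hd
  have hGpos : 0 < Nat.gcd n.natAbs d.natAbs := Nat.gcd_pos_of_pos_right _ hDpos
  have hGD : Nat.gcd n.natAbs d.natAbs ∣ d.natAbs := Nat.gcd_dvd_right _ _
  set G := Nat.gcd n.natAbs d.natAbs with hGdef
  set M := d.natAbs / G with hMdef
  have hMpos : 0 < M := Nat.div_pos (Nat.le_of_dvd hDpos hGD) hGpos
  have habs_n : |n| = (n.natAbs : Int) := Int.abs_eq_natAbs n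
  have habs_d : |d| = (d.natAbs : Int) := Int.abs_eq_natAbs d
  have hg : euclidLoop |n| |d| = (G : Int) := by
    rw [habs_n, habs_d, euclidLoop_eq_gcd _ _ (by positivity) (by positivity),
      Int.toNat_natCast, Int.toNat_natCast]
  have hm : PySem.Int.floordiv |d| (euclidLoop |n| |d|) = (M : Int) := by
    rw [hg, habs_d, PySem.Int.floordiv_eq_ediv_of_pos (by exact_mod_cast hGpos), hMdef]
    norm_cast
  obtain ⟨a2, h2eq, h2nd, h2pos⟩ :=
    stripLoop_spec 2 (by norm_num) ((M : Int)) (by exact_mod_cast hMpos)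
  obtain ⟨b5, h5eq, h5nd, h5pos⟩ :=
    stripLoop_spec 5 (by norm_num) (stripLoop 2 (M : Int)) h2pos
  show decide (stripLoop 5 (stripLoop 2 (PySem.Int.floordiv |d| (euclidLoop |n| |d|))) = 1)
      = true ↔ _
  rw [hm, decide_eq_true_iff]
  constructor
  · intro h1
    refine ⟨a2, b5, ?_⟩
    have hcast : (M : Int) = 2 ^ a2 * 5 ^ b5 := by rw [h2eq, h5eq, h1]; ring
    exact_mod_cast hcast
  · rintro ⟨a, b, hMab⟩
    have hMabI : (M : Int) = 2 ^ a * 5 ^ b := by exact_mod_cast hMab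
    set s5 := stripLoop 5 (stripLoop 2 (M : Int)) with hs5def
    have hstep : s5 ∣ stripLoop 2 (M : Int) := by
      rw [h5eq]; exact Dvd.dvd.mul_left dvd_rfl _
    have hs5_dvd_M : s5 ∣ (M : Int) := by
      rw [h2eq]; exact hstep.mul_left _
    have h2nd5 : ¬ (2 : Int) ∣ s5 := fun hdv => h2nd (by rw [h5eq]; exact Dvd.dvd.mul_left hdv _)
    have hs5S : s5 = (s5.toNat : Int) := (Int.toNat_of_nonneg (le_of_lt h5pos)).symm
    have hSdvd : s5.toNat ∣ 2 ^ a * 5 ^ b := by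
      have hdv : s5 ∣ ((2 ^ a * 5 ^ b : Nat) : Int) := by
        rw [show ((2 ^ a * 5 ^ b : Nat) : Int) = 2 ^ a * 5 ^ b by push_cast; ring, ← hMabI]
        exact hs5_dvd_M
      rw [hs5S] at hdv
      exact_mod_cast hdv
    have hS2 : ¬ 2 ∣ s5.toNat := fun h => h2nd5 (by rw [hs5S]; exact_mod_cast h)
    have hS5 : ¬ 5 ∣ s5.toNat := fun h => h5nd (by rw [hs5S]; exact_mod_cast h)
    have hcop : Nat.Coprime s5.toNat (2 ^ a * 5 ^ b) :=
      Nat.Coprime.mul_right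
        (((Nat.Prime.coprime_iff_not_dvd Nat.prime_two).mpr hS2).symm.pow_right _)
        (((Nat.Prime.coprime_iff_not_dvd (by norm_num)).mpr hS5).symm.pow_right _)
    have hone : s5.toNat = 1 := by
      have hdg := Nat.dvd_gcd (dvd_refl s5.toNat) hSdvd
      unfold Nat.Coprime at hcop
      rw [hcop] at hdg
      exact Nat.dvd_one.mp hdg
    rw [hs5S, hone]
    norm_num

-- one concrete exponent at which the reduced denominator 2^a·5^b divides a power of 10
lemma dvd_at (n d : Int) (hd : d ≠ 0) (a b : Nat)
    (hMab : d.natAbs / Nat.gcd n.natAbs d.natAbs = 2 ^ a * 5 ^ b) :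
    d ∣ 10 ^ (max a b) * n := by
  have hDpos : 0 < d.natAbs := Int.natAbs_pos.mpr hd
  have hGD : Nat.gcd n.natAbs d.natAbs ∣ d.natAbs := Nat.gcd_dvd_right _ _
  have hNat : d.natAbs ∣ 10 ^ (max a b) * n.natAbs := by
    have hDGM : d.natAbs = Nat.gcd n.natAbs d.natAbs * (d.natAbs / Nat.gcd n.natAbs d.natAbs) :=
      (Nat.mul_div_cancel' hGD).symm
    have h25 : 2 ^ a * 5 ^ b ∣ 10 ^ (max a b) := by
      rw [show (10 : Nat) ^ (max a b) = 2 ^ (max a b) * 5 ^ (max a b) by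
        rw [show (10 : Nat) = 2 * 5 from rfl, mul_pow]]
      exact mul_dvd_mul (pow_dvd_pow 2 (le_max_left a b)) (pow_dvd_pow 5 (le_max_right a b))
    rw [hDGM, hMab, mul_comm (10 ^ (max a b)) n.natAbs]
    exact mul_dvd_mul (Nat.gcd_dvd_left n.natAbs d.natAbs) h25
  apply Int.natAbs_dvd_natAbs.mp
  simpa [Int.natAbs_mul, Int.natAbs_pow] using hNat

lemma exists_dvd_iff (n d : Int) (hd : d ≠ 0) :
    ((∃ k : Nat, d ∣ 10 ^ k * n) ↔
      ∃ a b : Nat, d.natAbs / Nat.gcd n.natAbs d.natAbs = 2 ^ a * 5 ^ b) := by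
  have hDpos : 0 < d.natAbs := Int.natAbs_pos.mpr hd
  have hGpos : 0 < Nat.gcd n.natAbs d.natAbs := Nat.gcd_pos_of_pos_right _ hDpos
  have hGD : Nat.gcd n.natAbs d.natAbs ∣ d.natAbs := Nat.gcd_dvd_right _ _
  have hGN : Nat.gcd n.natAbs d.natAbs ∣ n.natAbs := Nat.gcd_dvd_left _ _
  constructor
  · rintro ⟨k, hk⟩
    have hk' : d.natAbs ∣ 10 ^ k * n.natAbs := by
      have := Int.natAbs_dvd_natAbs.mpr hk
      simpa [Int.natAbs_mul, Int.natAbs_pow] using this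
    set G := Nat.gcd n.natAbs d.natAbs with hGdef
    have h1 : G * (d.natAbs / G) ∣ G * (10 ^ k * (n.natAbs / G)) := by
      rw [Nat.mul_div_cancel' hGD]
      obtain ⟨N', hN'⟩ := hGN
      have hdiv : n.natAbs / G = N' := by rw [hN']; exact Nat.mul_div_cancel_left N' (by omega)
      calc d.natAbs ∣ 10 ^ k * n.natAbs := hk'
        _ = G * (10 ^ k * (n.natAbs / G)) := by rw [hdiv, hN']; ring
    have h2 : d.natAbs / G ∣ 10 ^ k * (n.natAbs / G) :=
      (mul_dvd_mul_iff_left (by omega : G ≠ 0)).mp h1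
    have hcop : Nat.Coprime (d.natAbs / G) (n.natAbs / G) :=
      (Nat.coprime_div_gcd_div_gcd hGpos).symm
    have h3 : d.natAbs / G ∣ 10 ^ k := hcop.dvd_of_dvd_mul_right h2
    rw [show (10 : Nat) ^ k = 2 ^ k * 5 ^ k by
      rw [show (10 : Nat) = 2 * 5 from rfl, mul_pow]] at h3
    obtain ⟨d1, d2, hd1, hd2, hMd⟩ := exists_dvd_and_dvd_of_dvd_mul h3
    obtain ⟨a, _, rfl⟩ := (Nat.dvd_prime_pow Nat.prime_two).mp hd1
    obtain ⟨b, _, rfl⟩ := (Nat.dvd_prime_pow (by norm_num)).mp hd2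
    exact ⟨a, b, hMd⟩
  · rintro ⟨a, b, hMab⟩
    exact ⟨max a b, dvd_at n d hd a b hMab⟩

-- ===== VERDICT (by name: the statement is the Claim_ definition above) =====
theorem is_terminating_spec : Claim_equal_is_terminating := by
  intro n d _ hd
  unfold Spec_is_terminating
  by_cases hT : ∃ k : Nat, d ∣ 10 ^ k * n
  · have hB : is_terminating_alt n d = true :=
      (portB_char n d hd).mpr ((exists_dvd_iff n d hd).mp hT)
    obtain ⟨a, b, hMab⟩ := (exists_dvd_iff n d hd).mp hT
    have hDpos : 0 < d.natAbs := Int.natAbs_pos.mpr hd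
    have hGD : Nat.gcd n.natAbs d.natAbs ∣ d.natAbs := Nat.gcd_dvd_right _ _
    have hKmax : Nat.find hT ≤ max a b := Nat.find_min' hT (dvd_at n d hd a b hMab)
    have hMle : 2 ^ a * 5 ^ b ≤ d.natAbs := by
      rw [← hMab]
      exact Nat.le_of_dvd hDpos (Nat.div_dvd_of_dvd hGD)
    have hamax : max a b < 2 ^ a * 5 ^ b := by
      have h2 : a < 2 ^ a * 5 ^ b :=
        lt_of_lt_of_le Nat.lt_two_pow_self (Nat.le_mul_of_pos_right _ (by positivity))
      have h5 : b < 2 ^ a * 5 ^ b :=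
        lt_of_lt_of_le (lt_of_lt_of_le Nat.lt_two_pow_self (Nat.pow_le_pow_left (by norm_num) b))
          (Nat.le_mul_of_pos_left _ (by positivity))
      omega
    have hA : is_terminating n d = true := by
      unfold is_terminating
      apply loop_true d hd (Nat.find hT) _ _ n (by omega) (Nat.find_spec hT)
        (fun j hj => Nat.find_min hT hj)
      intro p hp
      simp [PySem.Set.empty] at hp
    rw [hA, hB]
  · rw [not_exists] at hT
    have hA : is_terminating n d = false := by
      unfold is_terminating
      exact loop_false d hd _ _ n hT
    have hB : is_terminating_alt n d = false := by
      by_contra hB'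
      have hb : is_terminating_alt n d = true := by
        cases hX : is_terminating_alt n d
        · exact absurd hX hB'
        · rfl
      obtain ⟨a, b, hMab⟩ := (portB_char n d hd).mp hb
      exact hT (max a b) (dvd_at n d hd a b hMab)
    rw [hA, hB]
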